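-- pv_equiv track=rewrite | github.com/vosslab/biology-problems | problems/biochemistry-problems/lipids/fatty_acid_lib.py | shift_bond_indices
-- ===== SOURCE A (Python) =====
-- def shift_bond_indices(bond_indices, amount: int, chain_length: int):
-- 	"""
-- 	Shift each bond index by amount. Returns the shifted list, or an
-- 	empty list if any shifted index would fall outside [0, chain_length-2].
-- 	Useful for building off-by-one distractors.
-- 	"""
-- 	shifted = []
-- 	for b in bond_indices:
-- 		new_b = b + amount
-- 		if new_b < 0 or new_b > chain_length - 2:
-- 			return []
-- 		shifted.append(new_b)
-- 	return shifted
-- ===== SOURCE B (Python) =====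
-- def shift_bond_indices(bond_indices, amount: int, chain_length: int):
--     # Monotonicity: b + amount is within [0, chain_length-2] for every b
--     # iff it is for the smallest and the largest b. So validate only the
--     # extremes, then shift.
--     if not bond_indices:
--         return []
--     lo = min(bond_indices)
--     hi = max(bond_indices)
--     if lo + amount >= 0 and hi + amount <= chain_length - 2:
--         return [b + amount for b in bond_indices]
--     return []
-- ===== Notes on version B (the rewrite author's own statement) =====
-- stated objective: alternative
-- what changed: A checks every shifted element against the bounds inside an accumulate-and-early-return loop; B exploits monotonicity of the bound test and validates only the two extremal elements (min and max of the input), then shifts the whole list in one map.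
import Mathlib
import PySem

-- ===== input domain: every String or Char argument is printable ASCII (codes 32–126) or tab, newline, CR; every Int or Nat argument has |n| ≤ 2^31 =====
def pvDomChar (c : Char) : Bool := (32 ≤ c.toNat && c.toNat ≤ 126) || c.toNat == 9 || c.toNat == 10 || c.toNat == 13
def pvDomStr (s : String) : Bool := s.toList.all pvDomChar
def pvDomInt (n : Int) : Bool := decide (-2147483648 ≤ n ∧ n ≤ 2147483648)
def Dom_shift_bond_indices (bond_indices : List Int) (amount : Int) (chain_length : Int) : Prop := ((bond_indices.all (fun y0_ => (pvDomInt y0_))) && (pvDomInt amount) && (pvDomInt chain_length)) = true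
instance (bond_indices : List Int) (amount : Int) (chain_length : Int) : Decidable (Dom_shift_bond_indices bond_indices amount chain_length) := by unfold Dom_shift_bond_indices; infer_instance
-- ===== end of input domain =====

-- B validates only the extremal elements (min/max) by monotonicity of the bound
-- test, then shifts the whole list; A checks every element in an early-return loop.

-- ===== PORT A =====
-- A's loop: accumulate shifted values, returning [] the moment one is out of range.
def shiftBondLoopA (bs : List Int) (amount : Int) (chain_length : Int) (shifted : List Int) : List Int :=
  match bs with
  | [] => shifted
  | b :: rest =>
    let new_b := b + amount
    if new_b < 0 ∨ new_b > chain_length - 2 then []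
    else shiftBondLoopA rest amount chain_length (shifted ++ [new_b])

def shift_bond_indices (bond_indices : List Int) (amount : Int) (chain_length : Int) : List Int :=
  shiftBondLoopA bond_indices amount chain_length []

-- ===== PORT B =====
-- min/max of a nonempty list, as Python's builtins compute them (fold over the tail).
def shift_bond_indices_alt (bond_indices : List Int) (amount : Int) (chain_length : Int) : List Int :=
  match bond_indices with
  | [] => []
  | b :: rest =>
    let lo := rest.foldl min b
    let hi := rest.foldl max b
    if 0 ≤ lo + amount ∧ hi + amount ≤ chain_length - 2 then
      bond_indices.map (fun x => x + amount)
    else []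

-- ===== PRECONDITION & SPEC =====
def Spec_shift_bond_indices (bond_indices : List Int) (amount : Int) (chain_length : Int) (out : List Int) : Prop := out = shift_bond_indices_alt bond_indices amount chain_length
instance (bond_indices : List Int) (amount : Int) (chain_length : Int) (out : List Int) : Decidable (Spec_shift_bond_indices bond_indices amount chain_length out) := by unfold Spec_shift_bond_indices; infer_instance

-- ===== CLAIM =====
def Claim_equal_shift_bond_indices : Prop := ∀ (bond_indices : List Int) (amount : Int) (chain_length : Int), Dom_shift_bond_indices bond_indices amount chain_length → Spec_shift_bond_indices bond_indices amount chain_length (shift_bond_indices bond_indices amount chain_length)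

-- ===== LEMMAS AND PROOFS =====
theorem shiftBondLoopA_eq (bs : List Int) (amount chain_length : Int) (acc : List Int) :
    shiftBondLoopA bs amount chain_length acc =
      if ∀ b ∈ bs, 0 ≤ b + amount ∧ b + amount ≤ chain_length - 2
      then acc ++ bs.map (fun b => b + amount) else [] := by
  induction bs generalizing acc with
  | nil => simp [shiftBondLoopA]
  | cons b rest ih =>
    simp only [shiftBondLoopA]
    by_cases h : b + amount < 0 ∨ b + amount > chain_length - 2
    · rw [if_pos h, if_neg]
      intro hall
      have := hall b (List.mem_cons_self ..)
      omega
    · rw [if_neg h, ih]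
      have hb : 0 ≤ b + amount ∧ b + amount ≤ chain_length - 2 := by omega
      by_cases hr : ∀ x ∈ rest, 0 ≤ x + amount ∧ x + amount ≤ chain_length - 2
      · rw [if_pos hr, if_pos]
        · simp
        · intro x hx
          rcases List.mem_cons.mp hx with rfl | hx
          · exact hb
          · exact hr x hx
      · rw [if_neg hr, if_neg (fun hall => hr fun x hx => hall x (List.mem_cons_of_mem _ hx))]

theorem foldl_min_le (rest : List Int) (b : Int) :
    ∀ x ∈ b :: rest, rest.foldl min b ≤ x := by
  induction rest generalizing b with
  | nil => simp
  | cons h t ih =>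
    intro x hx
    simp only [List.foldl_cons]
    have hmb : t.foldl min (min b h) ≤ min b h := ih (min b h) _ (List.mem_cons_self ..)
    rcases List.mem_cons.mp hx with rfl | hx
    · exact le_trans hmb (min_le_left ..)
    rcases List.mem_cons.mp hx with rfl | hx
    · exact le_trans hmb (min_le_right ..)
    · exact ih (min b h) x (List.mem_cons_of_mem _ hx)

theorem foldl_le_max (rest : List Int) (b : Int) :
    ∀ x ∈ b :: rest, x ≤ rest.foldl max b := by
  induction rest generalizing b with
  | nil => simp
  | cons h t ih =>
    intro x hx
    simp only [List.foldl_cons]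
    have hmb : max b h ≤ t.foldl max (max b h) := ih (max b h) _ (List.mem_cons_self ..)
    rcases List.mem_cons.mp hx with rfl | hx
    · exact le_trans (le_max_left ..) hmb
    rcases List.mem_cons.mp hx with rfl | hx
    · exact le_trans (le_max_right ..) hmb
    · exact ih (max b h) x (List.mem_cons_of_mem _ hx)

theorem foldl_min_mem (rest : List Int) (b : Int) :
    rest.foldl min b ∈ b :: rest := by
  induction rest generalizing b with
  | nil => simp
  | cons h t ih =>
    simp only [List.foldl_cons]
    rcases List.mem_cons.mp (ih (min b h)) with hm | hm
    · rcases min_choice b h with hc | hc <;> rw [hm, hc] <;> simp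
    · simp [hm]

theorem foldl_max_mem (rest : List Int) (b : Int) :
    rest.foldl max b ∈ b :: rest := by
  induction rest generalizing b with
  | nil => simp
  | cons h t ih =>
    simp only [List.foldl_cons]
    rcases List.mem_cons.mp (ih (max b h)) with hm | hm
    · rcases max_choice b h with hc | hc <;> rw [hm, hc] <;> simp
    · simp [hm]

-- ===== VERDICT =====
theorem shift_bond_indices_spec : Claim_equal_shift_bond_indices := by
  intro bond_indices amount chain_length _
  unfold Spec_shift_bond_indices shift_bond_indices
  rw [shiftBondLoopA_eq]
  cases bond_indices with
  | nil => simp [shift_bond_indices_alt]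
  | cons b rest =>
    simp only [shift_bond_indices_alt]
    have hiff : (∀ x ∈ b :: rest, 0 ≤ x + amount ∧ x + amount ≤ chain_length - 2) ↔
        (0 ≤ rest.foldl min b + amount ∧ rest.foldl max b + amount ≤ chain_length - 2) := by
      constructor
      · intro h
        exact ⟨(h _ (foldl_min_mem rest b)).1, (h _ (foldl_max_mem rest b)).2⟩
      · intro h x hx
        have h1 := foldl_min_le rest b x hx
        have h2 := foldl_le_max rest b x hx
        omega
    by_cases hc : ∀ x ∈ b :: rest, 0 ≤ x + amount ∧ x + amount ≤ chain_length - 2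
    · rw [if_pos hc, if_pos (hiff.mp hc)]
      simp
    · rw [if_neg hc, if_neg (fun h => hc (hiff.mpr h))]
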